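-- pv_equiv track=rewrite | github.com/MaloKerrand/adventofcode | 2024/12/main_2.py | add_fence
-- ===== SOURCE A (Python) =====
-- def add_fence(fences: list[tuple[int, int, int, int, bool]], new: tuple[int, int, int, int, bool]):
--     aggregated_fence: tuple[int, int, int, int, bool] | None = None
--     old_fences: list[tuple[int, int, int, int, bool]] | None = None
--     for index, (x1, y1, x2, y2, face_x) in enumerate(fences):
--         if face_x != new[4]:
--             continue
--         if (x1, y1) == (new[2], new[3]):
--             aggregated_fence = (new[0], new[1], x2, y2, face_x)
--             old_fences = fences[:index] + fences[index + 1 :]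
--             break
--         if (x2, y2) == (new[0], new[1]):
--             aggregated_fence = (x1, y1, new[2], new[3], face_x)
--             old_fences = fences[:index] + fences[index + 1 :]
--             break
--     if aggregated_fence is None:
--         return fences + [new]
--     return add_fence(fences=old_fences, new=aggregated_fence)
-- ===== SOURCE B (Python) =====
-- def add_fence(fences: list[tuple[int, int, int, int, bool]], new: tuple[int, int, int, int, bool]):
--     current = new
--     rest = list(fences)
--     while True:
--         before = []
--         it = iter(rest)
--         for seg in it:
--             x1, y1, x2, y2, f = seg
--             if f == current[4] and (x1, y1) == (current[2], current[3]):
--                 current = (current[0], current[1], x2, y2, f)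
--                 rest = before + list(it)
--                 break
--             if f == current[4] and (x2, y2) == (current[0], current[1]):
--                 current = (x1, y1, current[2], current[3], f)
--                 rest = before + list(it)
--                 break
--             before.append(seg)
--         else:
--             return rest + [current]
-- ===== Notes on version B (the rewrite author's own statement) =====
-- stated objective: alternative
-- what changed: Replaces A's tail recursion with an explicit while loop over a (current, rest) state, and replaces the enumerate-index-plus-slice removal of the matched fence by a one-pass prefix/suffix split with no indices.
import Mathlib
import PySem

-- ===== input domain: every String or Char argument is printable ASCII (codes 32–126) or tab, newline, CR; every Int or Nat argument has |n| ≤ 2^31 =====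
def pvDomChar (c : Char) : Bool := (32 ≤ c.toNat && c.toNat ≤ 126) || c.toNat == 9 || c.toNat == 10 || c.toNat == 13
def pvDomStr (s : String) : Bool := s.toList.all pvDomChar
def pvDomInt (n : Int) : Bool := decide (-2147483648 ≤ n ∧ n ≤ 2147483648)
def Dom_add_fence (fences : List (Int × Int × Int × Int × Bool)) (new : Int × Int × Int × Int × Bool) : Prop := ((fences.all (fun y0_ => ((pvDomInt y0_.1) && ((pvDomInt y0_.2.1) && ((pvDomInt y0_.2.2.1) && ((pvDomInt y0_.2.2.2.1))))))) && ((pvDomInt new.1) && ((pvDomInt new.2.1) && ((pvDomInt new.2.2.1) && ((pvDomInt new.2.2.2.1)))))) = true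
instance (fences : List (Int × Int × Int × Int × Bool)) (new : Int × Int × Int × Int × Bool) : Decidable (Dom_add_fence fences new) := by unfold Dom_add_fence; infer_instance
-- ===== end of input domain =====

-- B replaces A's recursion with a while loop and replaces the index-plus-slices removal by a
-- one-pass prefix/suffix split (objective: alternative decomposition; same asymptotic cost).

-- ===== PORT A =====
-- A's for-loop over enumerate(fences): scan the remainder `rem` keeping the running index `idx`
-- (invariant: rem = fences.drop idx); on a match it returns the aggregated fence together with
-- fences[:index] + fences[index+1:], exactly as A builds old_fences.
def add_fence_scanA (fences : List (Int × Int × Int × Int × Bool))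
    (new : Int × Int × Int × Int × Bool) (idx : Nat)
    (rem : List (Int × Int × Int × Int × Bool)) :
    Option ((Int × Int × Int × Int × Bool) × List (Int × Int × Int × Int × Bool)) :=
  match rem with
  | [] => none
  | (x1, y1, x2, y2, face_x) :: tl =>
    if face_x ≠ new.2.2.2.2 then
      add_fence_scanA fences new (idx + 1) tl
    else if (x1, y1) = (new.2.2.1, new.2.2.2.1) then
      some ((new.1, new.2.1, x2, y2, face_x), fences.take idx ++ fences.drop (idx + 1))
    else if (x2, y2) = (new.1, new.2.1) then
      some ((x1, y1, new.2.2.1, new.2.2.2.1, face_x), fences.take idx ++ fences.drop (idx + 1))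
    else
      add_fence_scanA fences new (idx + 1) tl

-- used by add_fence's decreasing_by: A's old_fences is one element shorter than fences
theorem add_fence_scanA_length (new : (Int × Int × Int × Int × Bool))
    (fences : List (Int × Int × Int × Int × Bool)) :
    ∀ (rem : List (Int × Int × Int × Int × Bool)) (idx : Nat), fences.drop idx = rem →
      ∀ agg old, add_fence_scanA fences new idx rem = some (agg, old) →
        old.length < fences.length := by
  intro rem
  induction rem with
  | nil => intro idx _ agg old h; simp [add_fence_scanA] at h
  | cons hd tl ih =>
    intro idx hdrop agg old h
    obtain ⟨x1, y1, x2, y2, fx⟩ := hd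
    have hidx : idx < fences.length := by
      by_contra hge
      push_neg at hge
      have : fences.drop idx = [] := List.drop_eq_nil_of_le hge
      rw [this] at hdrop; simp at hdrop
    have htl : fences.drop (idx + 1) = tl := by
      have h0 : (fences.drop idx).drop 1 = tl := by rw [hdrop]; rfl
      rw [List.drop_drop] at h0
      simpa [Nat.add_comm] using h0
    have hlen : (fences.take idx ++ fences.drop (idx + 1)).length < fences.length := by
      simp [List.length_take, List.length_drop]
      omega
    simp only [add_fence_scanA] at h
    split_ifs at h with h1 h2 h3
    · exact ih (idx + 1) htl agg old h
    · simp at h; exact h.2 ▸ hlen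
    · simp at h; exact h.2 ▸ hlen
    · exact ih (idx + 1) htl agg old h

def add_fence (fences : List (Int × Int × Int × Int × Bool)) (new : Int × Int × Int × Int × Bool) : List (Int × Int × Int × Int × Bool) :=
  match h : add_fence_scanA fences new 0 fences with
  | none => fences ++ [new]
  | some (aggregated_fence, old_fences) => add_fence old_fences aggregated_fence
termination_by fences.length
decreasing_by
  exact add_fence_scanA_length new fences fences 0 rfl _ _ h

-- ===== PORT B =====
-- B's inner for-loop: walk `rem` once, accumulating the unmatched prefix in `before`; on a match
-- return the merged segment together with before + remaining-iterator, no indices, no slices.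
def add_fence_scanB (current : Int × Int × Int × Int × Bool)
    (before : List (Int × Int × Int × Int × Bool))
    (rem : List (Int × Int × Int × Int × Bool)) :
    Option ((Int × Int × Int × Int × Bool) × List (Int × Int × Int × Int × Bool)) :=
  match rem with
  | [] => none
  | (x1, y1, x2, y2, f) :: tl =>
    if f = current.2.2.2.2 ∧ (x1, y1) = (current.2.2.1, current.2.2.2.1) then
      some ((current.1, current.2.1, x2, y2, f), before ++ tl)
    else if f = current.2.2.2.2 ∧ (x2, y2) = (current.1, current.2.1) then
      some ((x1, y1, current.2.2.1, current.2.2.2.1, f), before ++ tl)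
    else
      add_fence_scanB current (before ++ [(x1, y1, x2, y2, f)]) tl

-- used by the loop's decreasing_by: the updated rest is one element shorter
theorem add_fence_scanB_length (current : Int × Int × Int × Int × Bool) :
    ∀ (rem before : List (Int × Int × Int × Int × Bool)) m rest',
      add_fence_scanB current before rem = some (m, rest') →
      rest'.length + 1 = before.length + rem.length := by
  intro rem
  induction rem with
  | nil => intro before m rest' h; simp [add_fence_scanB] at h
  | cons hd tl ih =>
    intro before m rest' h
    obtain ⟨x1, y1, x2, y2, f⟩ := hd
    simp only [add_fence_scanB] at h
    split_ifs at h with h1 h2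
    · simp at h; obtain ⟨_, h⟩ := h; subst h; simp; omega
    · simp at h; obtain ⟨_, h⟩ := h; subst h; simp; omega
    · have := ih (before ++ [(x1, y1, x2, y2, f)]) m rest' h
      simp at this ⊢; omega

-- B's while-True loop over the state (rest, current)
def add_fence_altLoop (rest : List (Int × Int × Int × Int × Bool))
    (current : Int × Int × Int × Int × Bool) : List (Int × Int × Int × Int × Bool) :=
  match h : add_fence_scanB current [] rest with
  | none => rest ++ [current]
  | some (m, rest') => add_fence_altLoop rest' m
termination_by rest.length
decreasing_by
  have := add_fence_scanB_length current rest [] _ _ h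
  simp at this; omega

def add_fence_alt (fences : List (Int × Int × Int × Int × Bool)) (new : Int × Int × Int × Int × Bool) : List (Int × Int × Int × Int × Bool) :=
  add_fence_altLoop fences new

-- ===== PRECONDITION & SPEC =====
def Spec_add_fence (fences : List (Int × Int × Int × Int × Bool)) (new : Int × Int × Int × Int × Bool) (out : List (Int × Int × Int × Int × Bool)) : Prop := out = add_fence_alt fences new
instance (fences : List (Int × Int × Int × Int × Bool)) (new : Int × Int × Int × Int × Bool) (out : List (Int × Int × Int × Int × Bool)) : Decidable (Spec_add_fence fences new out) := by unfold Spec_add_fence; infer_instance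

-- ===== CLAIM (what is proved, stated in full; the proofs are below) =====
def Claim_equal_add_fence : Prop := ∀ (fences : List (Int × Int × Int × Int × Bool)) (new : Int × Int × Int × Int × Bool), Dom_add_fence fences new → Spec_add_fence fences new (add_fence fences new)

-- ===== LEMMAS AND PROOFS =====

-- the two scans agree: when rem = fences.drop idx and before = fences.take idx, A's slice
-- fences[:idx] ++ fences[idx+1:] is exactly B's before ++ tl, and the branch tests coincide.
theorem scanA_eq_scanB (fences : List (Int × Int × Int × Int × Bool))
    (new : Int × Int × Int × Int × Bool) :
    ∀ (rem : List (Int × Int × Int × Int × Bool)) (idx : Nat),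
      fences.drop idx = rem →
      add_fence_scanA fences new idx rem = add_fence_scanB new (fences.take idx) rem := by
  intro rem
  induction rem with
  | nil => intro idx _; simp [add_fence_scanA, add_fence_scanB]
  | cons hd tl ih =>
    intro idx hdrop
    obtain ⟨x1, y1, x2, y2, fx⟩ := hd
    have hidx : idx < fences.length := by
      by_contra hge
      push_neg at hge
      have : fences.drop idx = [] := List.drop_eq_nil_of_le hge
      rw [this] at hdrop; simp at hdrop
    have htl : fences.drop (idx + 1) = tl := by
      have h0 : (fences.drop idx).drop 1 = tl := by rw [hdrop]; rfl
      rw [List.drop_drop] at h0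
      simpa [Nat.add_comm] using h0
    have htake : fences.take (idx + 1) = fences.take idx ++ [(x1, y1, x2, y2, fx)] := by
      have h0 : (fences.drop idx)[0]? = some (x1, y1, x2, y2, fx) := by rw [hdrop]; rfl
      rw [List.getElem?_drop] at h0
      simp only [Nat.add_zero] at h0
      rw [List.take_succ]
      simp [h0]
    simp only [add_fence_scanA, add_fence_scanB]
    by_cases hf : fx = new.2.2.2.2
    · subst hf
      simp only [ne_eq, not_true_eq_false, if_false, true_and]
      by_cases h1 : (x1, y1) = (new.2.2.1, new.2.2.2.1)
      · simp [h1, htl]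
      · simp only [h1, if_false]
        by_cases h2 : (x2, y2) = (new.1, new.2.1)
        · simp [h2, htl]
        · simp only [h2, if_false]
          rw [ih (idx + 1) htl, htake]
    · simp only [hf, ne_eq, not_false_eq_true, if_true, false_and, if_false]
      rw [ih (idx + 1) htl, htake]

theorem add_fence_eq_loop (n : Nat) :
    ∀ (fences : List (Int × Int × Int × Int × Bool)) (new : Int × Int × Int × Int × Bool),
      fences.length ≤ n → add_fence fences new = add_fence_altLoop fences new := by
  induction n with
  | zero =>
    intro fences new hlen
    have : fences = [] := List.eq_nil_of_length_eq_zero (by omega)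
    subst this
    rw [add_fence, add_fence_altLoop]
    simp [add_fence_scanA, add_fence_scanB]
  | succ n ih =>
    intro fences new hlen
    have heq : add_fence_scanA fences new 0 fences = add_fence_scanB new [] fences := by
      have := scanA_eq_scanB fences new fences 0 rfl
      simpa using this
    rw [add_fence, add_fence_altLoop]
    split
    · rename_i hA
      split
      · rfl
      · rename_i m rest' hB
        rw [heq, hB] at hA; exact absurd hA (by simp)
    · rename_i agg old hA
      split
      · rename_i hB
        rw [heq, hB] at hA; exact absurd hA (by simp)
      · rename_i m rest' hB
        rw [heq, hB] at hA
        obtain ⟨h1, h2⟩ : m = agg ∧ rest' = old := by simpa using hA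
        have hlt : rest'.length < fences.length := by
          have := add_fence_scanB_length new fences [] m rest' hB
          simp at this; omega
        rw [← h1, ← h2]
        exact ih rest' m (by omega)

-- ===== VERDICT (by name: the statement is the Claim_ definition above) =====
theorem add_fence_spec : Claim_equal_add_fence := by
  intro fences new _
  unfold Spec_add_fence add_fence_alt
  exact add_fence_eq_loop fences.length fences new le_rfl
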